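-- pv_equiv track=rewrite | github.com/reedjacobp/kalshi-trading-bot | python-bot/optimize_rr.py | classify_ticker
-- ===== SOURCE A (Python) =====
-- def classify_ticker(ticker: str) -> tuple[str, str]:
--     """Map a Kalshi ticker to (coin, market_type) for cell grouping.
--
--     Kalshi's naming is inconsistent about what "D" means:
--       - KXBTCD, KXETHD, KXSOLD, KXDOGED, KXXRPD, KXBNBD, KXHYPED
--         are HOURLY markets that close on the hour (confirmed by
--         live ticker close_time patterns like 04:00:00Z, 05:00:00Z, etc.)
--       - KXSHIBAD is a true DAILY market that closes once per day
--         at 5pm EDT (confirmed by user 2026-04-14)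
--     We treat SHIBA as a separate "daily" market_type so the cell
--     name reflects reality (shiba_daily, not shiba_hourly) and so any
--     future market-type-specific tuning is clean.
--
--     Uses exact-match on the series component (everything before the
--     first "-") to avoid prefix collisions like "KXSOLDATHOLD-..." being
--     mis-classified as KXSOLD.
--     """
--     t = ticker.upper()
--     series = t.split("-", 1)[0]  # "KXBTCD-26APR..." → "KXBTCD"
--     if series == "KXSHIBAD":
--         return "shiba", "daily"
--     for coin in ["HYPE", "DOGE", "BTC", "ETH", "SOL", "XRP", "BNB"]:
--         if series == f"KX{coin}15M":
--             return coin.lower(), "15m"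
--         if series == f"KX{coin}D":
--             return coin.lower(), "hourly"
--     return "unknown", "unknown"
-- ===== SOURCE B (Python) =====
-- def classify_ticker(ticker: str) -> tuple[str, str]:
--     """Structural parse: special-case KXSHIBAD, then strip 'KX' and a '15M'/'D'
--     suffix and check the remaining coin against a fixed set (no per-coin loop)."""
--     series = ticker.upper().split("-", 1)[0]
--     if series == "KXSHIBAD":
--         return "shiba", "daily"
--     coins = {"HYPE", "DOGE", "BTC", "ETH", "SOL", "XRP", "BNB"}
--     if series.startswith("KX"):
--         body = series[2:]
--         if body.endswith("15M"):
--             coin = body[:-3]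
--             if coin in coins:
--                 return coin.lower(), "15m"
--         elif body.endswith("D"):
--             coin = body[:-1]
--             if coin in coins:
--                 return coin.lower(), "hourly"
--     return "unknown", "unknown"
-- ===== Notes on version B (the rewrite author's own statement) =====
-- stated objective: simpler
-- what changed: Replaced A's loop over the seven coin templates (14 full-string comparisons) by a single structural parse: strip the 'KX' prefix and a trailing '15M' or 'D', then one membership test of the remaining coin in the fixed coin set.
import Mathlib
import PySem

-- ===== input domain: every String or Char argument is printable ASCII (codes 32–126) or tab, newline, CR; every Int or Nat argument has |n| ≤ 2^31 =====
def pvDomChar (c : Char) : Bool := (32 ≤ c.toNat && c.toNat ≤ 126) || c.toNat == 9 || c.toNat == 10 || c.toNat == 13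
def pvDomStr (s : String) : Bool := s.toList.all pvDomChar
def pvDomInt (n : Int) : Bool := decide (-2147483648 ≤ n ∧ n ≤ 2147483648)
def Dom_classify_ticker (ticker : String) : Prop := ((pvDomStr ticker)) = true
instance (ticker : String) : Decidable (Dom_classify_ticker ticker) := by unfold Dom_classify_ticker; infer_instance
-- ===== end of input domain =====

-- B replaces A's per-coin template loop by a single structural parse (strip "KX" and a
-- "15M"/"D" suffix, then one membership test in the fixed coin set): objective = simpler.


-- ===== PORT A =====
-- A's per-coin loop: try "KX{coin}15M" then "KX{coin}D" for each coin in order.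
def aLoop (series : String) : List String → String × String
  | [] => ("unknown", "unknown")
  | coin :: rest =>
    if series == "KX" ++ coin ++ "15M" then (PySem.Str.lower coin, "15m")
    else if series == "KX" ++ coin ++ "D" then (PySem.Str.lower coin, "hourly")
    else aLoop series rest

def classify_ticker (ticker : String) : String × String :=
  let t := PySem.Str.upper ticker
  let series := (PySem.List.pyGet? ((PySem.Str.splitMax? t "-" 1).getD []) 0).getD ""
  if series == "KXSHIBAD" then ("shiba", "daily")
  else aLoop series ["HYPE", "DOGE", "BTC", "ETH", "SOL", "XRP", "BNB"]

-- ===== PORT B =====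
-- B: structural parse — strip "KX" prefix and a "15M"/"D" suffix, one membership check.
def bParse (series : String) : String × String :=
  if series == "KXSHIBAD" then ("shiba", "daily")
  else
    let coins : List String := ["HYPE", "DOGE", "BTC", "ETH", "SOL", "XRP", "BNB"]
    if PySem.Str.startswith series "KX" then
      let body := PySem.Str.slice series (some 2) none
      if PySem.Str.endswith body "15M" then
        let coin := PySem.Str.slice body none (some (-3))
        if coin ∈ coins then (PySem.Str.lower coin, "15m") else ("unknown", "unknown")
      else if PySem.Str.endswith body "D" then
        let coin := PySem.Str.slice body none (some (-1))
        if coin ∈ coins then (PySem.Str.lower coin, "hourly") else ("unknown", "unknown")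
      else ("unknown", "unknown")
    else ("unknown", "unknown")

def classify_ticker_alt (ticker : String) : String × String :=
  let t := PySem.Str.upper ticker
  let series := (PySem.List.pyGet? ((PySem.Str.splitMax? t "-" 1).getD []) 0).getD ""
  bParse series

-- ===== PRECONDITION & SPEC =====
def Spec_classify_ticker (ticker : String) (out : String × String) : Prop := out = classify_ticker_alt ticker
instance (ticker : String) (out : String × String) : Decidable (Spec_classify_ticker ticker out) := by unfold Spec_classify_ticker; infer_instance

-- ===== CLAIM (what is proved, stated in full; the proofs are below) =====
def Claim_equal_classify_ticker : Prop := ∀ (ticker : String), Dom_classify_ticker ticker → Spec_classify_ticker ticker (classify_ticker ticker)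

-- ===== LEMMAS AND PROOFS =====

-- Structural decomposition: prefix + (take of body) + suffix reassemble the string.
theorem decomp (cs pre suf : List Char) (hp : pre <+: cs)
    (hs : suf <:+ cs.drop pre.length) :
    cs = pre ++ (cs.drop pre.length).take ((cs.drop pre.length).length - suf.length) ++ suf := by
  obtain ⟨t1, rfl⟩ := hp
  rw [List.drop_left] at hs ⊢
  obtain ⟨t2, rfl⟩ := hs
  simp

-- If B's "15m" branch fires, the series is exactly "KX" ++ coin ++ "15M".
theorem parse15 (s c : String) (hkx : PySem.Str.startswith s "KX" = true)
    (h15 : PySem.Str.endswith (PySem.Str.slice s (some 2) none) "15M" = true)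
    (hc : PySem.Str.slice (PySem.Str.slice s (some 2) none) none (some (-3)) = c) :
    s = "KX" ++ c ++ "15M" := by
  apply String.toList_inj.mp
  rw [String.toList_append, String.toList_append]
  have hkx' : "KX".toList <+: s.toList := by
    rw [← PySem.Chars.startswith_iff]; simpa using hkx
  have h15' : "15M".toList <:+ s.toList.drop 2 := by
    rw [← PySem.Chars.endswith_iff]
    have := h15
    simp only [PySem.Str.endswith_eq, PySem.Str.toList_slice,
      PySem.Chars.slice_eq_listSlice] at this
    rw [PySem.List.slice_from _ (by norm_num)] at this
    simpa using this
  have hc' : c.toList = (s.toList.drop 2).take ((s.toList.drop 2).length - 3) := by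
    rw [← hc]
    simp only [PySem.Str.toList_slice, PySem.Chars.slice_eq_listSlice]
    rw [PySem.List.slice_from _ (by norm_num), PySem.List.slice_to_neg_ofNat _ 3 (by norm_num)]
    simp
  have := decomp s.toList "KX".toList "15M".toList hkx' (by simpa using h15')
  simpa [hc'] using this

-- If B's "hourly" branch fires, the series is exactly "KX" ++ coin ++ "D".
theorem parseD (s c : String) (hkx : PySem.Str.startswith s "KX" = true)
    (hD : PySem.Str.endswith (PySem.Str.slice s (some 2) none) "D" = true)
    (hc : PySem.Str.slice (PySem.Str.slice s (some 2) none) none (some (-1)) = c) :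
    s = "KX" ++ c ++ "D" := by
  apply String.toList_inj.mp
  rw [String.toList_append, String.toList_append]
  have hkx' : "KX".toList <+: s.toList := by
    rw [← PySem.Chars.startswith_iff]; simpa using hkx
  have hD' : "D".toList <:+ s.toList.drop 2 := by
    rw [← PySem.Chars.endswith_iff]
    have := hD
    simp only [PySem.Str.endswith_eq, PySem.Str.toList_slice,
      PySem.Chars.slice_eq_listSlice] at this
    rw [PySem.List.slice_from _ (by norm_num)] at this
    simpa using this
  have hc' : c.toList = (s.toList.drop 2).take ((s.toList.drop 2).length - 1) := by
    rw [← hc]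
    simp only [PySem.Str.toList_slice, PySem.Chars.slice_eq_listSlice]
    rw [PySem.List.slice_from _ (by norm_num), PySem.List.slice_to_neg_one]
    simp [List.dropLast_eq_take]
  have := decomp s.toList "KX".toList "D".toList hkx' (by simpa using hD')
  simpa [hc'] using this

-- The pointwise fact: A's loop-based chain equals B's structural parse.
theorem chain_eq (s : String) :
    (if s == "KXSHIBAD" then (("shiba", "daily") : String × String)
     else aLoop s ["HYPE", "DOGE", "BTC", "ETH", "SOL", "XRP", "BNB"]) = bParse s := by
  by_cases h0 : s = "KXSHIBAD"
  · subst h0; decide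
  by_cases h1 : s = "KXHYPE15M"
  · subst h1; decide
  by_cases h2 : s = "KXDOGE15M"
  · subst h2; decide
  by_cases h3 : s = "KXBTC15M"
  · subst h3; decide
  by_cases h4 : s = "KXETH15M"
  · subst h4; decide
  by_cases h5 : s = "KXSOL15M"
  · subst h5; decide
  by_cases h6 : s = "KXXRP15M"
  · subst h6; decide
  by_cases h7 : s = "KXBNB15M"
  · subst h7; decide
  by_cases h8 : s = "KXHYPED"
  · subst h8; decide
  by_cases h9 : s = "KXDOGED"
  · subst h9; decide
  by_cases h10 : s = "KXBTCD"
  · subst h10; decide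
  by_cases h11 : s = "KXETHD"
  · subst h11; decide
  by_cases h12 : s = "KXSOLD"
  · subst h12; decide
  by_cases h13 : s = "KXXRPD"
  · subst h13; decide
  by_cases h14 : s = "KXBNBD"
  · subst h14; decide
  -- generic case: s matches no template, both sides give ("unknown", "unknown")
  have hA : aLoop s ["HYPE", "DOGE", "BTC", "ETH", "SOL", "XRP", "BNB"]
      = ("unknown", "unknown") := by
    simp [aLoop, h1, h2, h3, h4, h5, h6, h7, h8, h9, h10, h11, h12, h13, h14]
  have hB : bParse s = ("unknown", "unknown") := by
    rw [bParse, if_neg (by simp [h0])]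
    by_cases hkx : PySem.Str.startswith s "KX" = true
    · rw [if_pos hkx]
      by_cases h15 : PySem.Str.endswith (PySem.Str.slice s (some 2) none) "15M" = true
      · rw [if_pos h15]
        by_cases hmem : PySem.Str.slice (PySem.Str.slice s (some 2) none) none (some (-3))
            ∈ (["HYPE", "DOGE", "BTC", "ETH", "SOL", "XRP", "BNB"] : List String)
        · simp only [List.mem_cons, List.not_mem_nil, or_false] at hmem
          rcases hmem with h | h | h | h | h | h | h
          · exact absurd (parse15 s _ hkx h15 h) h1
          · exact absurd (parse15 s _ hkx h15 h) h2
          · exact absurd (parse15 s _ hkx h15 h) h3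
          · exact absurd (parse15 s _ hkx h15 h) h4
          · exact absurd (parse15 s _ hkx h15 h) h5
          · exact absurd (parse15 s _ hkx h15 h) h6
          · exact absurd (parse15 s _ hkx h15 h) h7
        · rw [if_neg hmem]
      · rw [if_neg h15]
        by_cases hD : PySem.Str.endswith (PySem.Str.slice s (some 2) none) "D" = true
        · rw [if_pos hD]
          by_cases hmemD : PySem.Str.slice (PySem.Str.slice s (some 2) none) none (some (-1))
              ∈ (["HYPE", "DOGE", "BTC", "ETH", "SOL", "XRP", "BNB"] : List String)
          · simp only [List.mem_cons, List.not_mem_nil, or_false] at hmemD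
            rcases hmemD with h | h | h | h | h | h | h
            · exact absurd (parseD s _ hkx hD h) h8
            · exact absurd (parseD s _ hkx hD h) h9
            · exact absurd (parseD s _ hkx hD h) h10
            · exact absurd (parseD s _ hkx hD h) h11
            · exact absurd (parseD s _ hkx hD h) h12
            · exact absurd (parseD s _ hkx hD h) h13
            · exact absurd (parseD s _ hkx hD h) h14
          · rw [if_neg hmemD]
        · rw [if_neg hD]
    · rw [if_neg hkx]
  simp [h0, hA, hB]

-- ===== VERDICT (by name: the statement is the Claim_ definition above) =====
theorem classify_ticker_spec : Claim_equal_classify_ticker := by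
  intro ticker _
  show classify_ticker ticker = classify_ticker_alt ticker
  unfold classify_ticker classify_ticker_alt
  exact chain_eq _
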